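-- pv_equiv track=rewrite | github.com/NayeonS2/TIL | Problem Solving/[PGRS]_해시_폰켓몬.py | solution
-- ===== SOURCE A (Python) =====
-- def solution(nums):
--     temp = {}
--     for n in nums:
--         n_key = str(n)
--         if n_key not in temp:
--             temp[n_key] = 1
--         else:
--             temp[n_key] += 1
--     pick = len(nums)//2
--     if len(temp) < pick:
--         answer = len(temp)
--     else:
--         answer = pick
--     return answer
-- ===== SOURCE B (Python) =====
-- def solution(nums):
--     keys = sorted(str(n) for n in nums)
--     distinct = 0
--     prev = None
--     for k in keys:
--         if k != prev:
--             distinct += 1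
--             prev = k
--     return min(distinct, len(nums) // 2)
-- ===== Notes on version B (the rewrite author's own statement) =====
-- stated objective: alternative
-- what changed: Replaces A's hash-count dictionary (built only to take its length) by a sort-then-adjacent-scan that counts runs of equal string keys, and replaces the final branch by min.
import Mathlib
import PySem

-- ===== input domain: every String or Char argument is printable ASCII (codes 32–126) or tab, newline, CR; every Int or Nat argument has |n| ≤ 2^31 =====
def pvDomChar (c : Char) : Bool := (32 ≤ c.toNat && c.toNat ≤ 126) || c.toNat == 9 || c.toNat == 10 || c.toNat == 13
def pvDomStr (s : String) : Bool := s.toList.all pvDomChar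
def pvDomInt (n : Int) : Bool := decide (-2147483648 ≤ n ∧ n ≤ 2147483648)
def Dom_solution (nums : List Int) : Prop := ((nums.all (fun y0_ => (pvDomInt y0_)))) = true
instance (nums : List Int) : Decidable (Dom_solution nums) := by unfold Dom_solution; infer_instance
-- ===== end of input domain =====

-- B replaces A's hash-count dictionary (kept only for its length) by a sort-then-adjacent-scan counting runs of equal string keys; alternative decomposition, not claimed faster.

-- ===== PORT A =====
def solution (nums : List Int) : Int :=
  let temp := nums.foldl (fun (d : PySem.Dict String Int) n =>
    let nKey := PySem.Int.toStr n
    if d.contains nKey = false then d.insert nKey 1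
    else d.insert nKey (d.getD nKey 0 + 1)) PySem.Dict.empty
  let pick := PySem.Int.floordiv (nums.length : Int) 2
  if (temp.size : Int) < pick then (temp.size : Int) else pick

-- ===== PORT B =====
def solution_alt (nums : List Int) : Int :=
  let keys := PySem.List.sorted (nums.map PySem.Int.toStr) (fun s => s)
  let st := keys.foldl (fun (st : Int × Option String) k =>
      if some k ≠ st.2 then (st.1 + 1, some k) else st) (0, none)
  min st.1 (PySem.Int.floordiv (nums.length : Int) 2)

-- ===== PRECONDITION & SPEC =====
def Spec_solution (nums : List Int) (out : Int) : Prop := out = solution_alt nums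
instance (nums : List Int) (out : Int) : Decidable (Spec_solution nums out) := by unfold Spec_solution; infer_instance

-- ===== CLAIM (what is proved, stated in full; the proofs are below) =====
def Claim_equal_solution : Prop := ∀ (nums : List Int), Dom_solution nums → Spec_solution nums (solution nums)

-- ===== LEMMAS AND PROOFS =====

-- A's dictionary holds exactly one entry per distinct string key.
theorem solution_size_eq (nums : List Int) :
    ((nums.foldl (fun (d : PySem.Dict String Int) n =>
      let nKey := PySem.Int.toStr n
      if d.contains nKey = false then d.insert nKey 1
      else d.insert nKey (d.getD nKey 0 + 1)) PySem.Dict.empty).size : Int)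
    = ((nums.map PySem.Int.toStr).toFinset.card : Int) := by
  have hfun : (fun (d : PySem.Dict String Int) n =>
      let nKey := PySem.Int.toStr n
      if d.contains nKey = false then d.insert nKey 1
      else d.insert nKey (d.getD nKey 0 + 1))
    = (fun (d : PySem.Dict String Int) n =>
      d.insert (PySem.Int.toStr n)
        (if d.contains (PySem.Int.toStr n) = false then 1
         else d.getD (PySem.Int.toStr n) 0 + 1)) := by
    funext d n
    by_cases h : d.contains (PySem.Int.toStr n) = false <;> simp [h]
  rw [hfun]
  have hkeys : (nums.foldl (fun (d : PySem.Dict String Int) n =>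
      d.insert (PySem.Int.toStr n)
        (if d.contains (PySem.Int.toStr n) = false then 1
         else d.getD (PySem.Int.toStr n) 0 + 1)) PySem.Dict.empty).keys
      = PySem.Set.ofList (nums.map PySem.Int.toStr) := by
    rw [PySem.Dict.keys_foldl_insert_key nums PySem.Int.toStr _ PySem.Dict.empty]
    rw [PySem.Dict.keys_empty, PySem.Set.update_nil_left]
  have hsize : ∀ d : PySem.Dict String Int, d.size = d.keys.length := by
    intro d; simp [PySem.Dict.size, PySem.Dict.keys]
  rw [hsize, hkeys]
  have hnd : (PySem.Set.ofList (nums.map PySem.Int.toStr)).Nodup := PySem.Set.nodup_ofList _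
  have hlen : (PySem.Set.ofList (nums.map PySem.Int.toStr)).length
      = (PySem.Set.ofList (nums.map PySem.Int.toStr)).toFinset.card :=
    (List.toFinset_card_of_nodup hnd).symm
  have hfs : (PySem.Set.ofList (nums.map PySem.Int.toStr)).toFinset
      = (nums.map PySem.Int.toStr).toFinset := by
    ext x; simp [List.mem_toFinset, PySem.Set.mem_ofList]
  rw [hlen, hfs]

-- B's adjacent scan over a sorted tail, started after seeing p, counts the distinct elements other than p.
theorem scan_count (l : List String) (c : Int) (p : String)
    (hs : l.Pairwise (· ≤ ·)) (hp : ∀ x ∈ l, p ≤ x) :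
    (l.foldl (fun (st : Int × Option String) k =>
      if some k ≠ st.2 then (st.1 + 1, some k) else st) (c, some p)).1
    = c + ((l.toFinset.erase p).card : Int) := by
  induction l generalizing c p with
  | nil => simp
  | cons k t ih =>
    have hkt : ∀ x ∈ t, k ≤ x := by
      intro x hx; exact (List.pairwise_cons.mp hs).1 x hx
    have hts : t.Pairwise (· ≤ ·) := (List.pairwise_cons.mp hs).2
    have hpk : p ≤ k := hp k (by simp)
    by_cases hkp : k = p
    · subst hkp
      simp only [List.foldl_cons, ne_eq, not_true_eq_false, reduceIte]
      rw [ih c k hts hkt]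
      congr 2
      simp [Finset.erase_insert_eq_erase]
    · have hlt : p < k := lt_of_le_of_ne hpk (fun h => hkp h.symm)
      have hpt : p ∉ t := fun h => absurd (hkt p h) (not_le.mpr hlt)
      simp only [List.foldl_cons, ne_eq, Option.some.injEq, hkp, not_false_eq_true, if_pos]
      rw [ih (c + 1) k hts hkt]
      have hcard : ((k :: t).toFinset.erase p).card = (t.toFinset.erase k).card + 1 := by
        rw [List.toFinset_cons]
        rw [Finset.erase_insert_of_ne hkp]
        rw [Finset.erase_eq_of_notMem (by simpa using hpt)]
        rw [Finset.card_insert_eq_ite]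
        split
        · next hk =>
          have h1 : 0 < t.toFinset.card := Finset.card_pos.mpr ⟨k, hk⟩
          rw [Finset.card_erase_of_mem hk]
          omega
        · next hk =>
          rw [Finset.erase_eq_of_notMem hk]
      rw [hcard]; push_cast; ring

-- B's scan counts the distinct elements of the sorted key list.
theorem scan_count_none (l : List String) (hs : l.Pairwise (· ≤ ·)) :
    (l.foldl (fun (st : Int × Option String) k =>
      if some k ≠ st.2 then (st.1 + 1, some k) else st) (0, none)).1
    = (l.toFinset.card : Int) := by
  cases l with
  | nil => simp
  | cons k t =>
    have hkt : ∀ x ∈ t, k ≤ x := by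
      intro x hx; exact (List.pairwise_cons.mp hs).1 x hx
    have hts : t.Pairwise (· ≤ ·) := (List.pairwise_cons.mp hs).2
    simp only [List.foldl_cons, ne_eq, reduceCtorEq, not_false_eq_true, if_pos]
    rw [scan_count t (0 + 1) k hts hkt]
    have hcard : ((k :: t).toFinset).card = (t.toFinset.erase k).card + 1 := by
      rw [List.toFinset_cons, Finset.card_insert_eq_ite]
      split
      · next hk =>
        have h1 : 0 < t.toFinset.card := Finset.card_pos.mpr ⟨k, hk⟩
        rw [Finset.card_erase_of_mem hk]
        omega
      · next hk =>
        rw [Finset.erase_eq_of_notMem hk]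
    rw [hcard]; push_cast; ring

-- ===== VERDICT (by name: the statement is the Claim_ definition above) =====
theorem solution_spec : Claim_equal_solution := by
  intro nums _
  unfold Spec_solution solution solution_alt
  simp only []
  rw [solution_size_eq nums]
  rw [scan_count_none _ (PySem.List.sorted_pairwise (nums.map PySem.Int.toStr) (fun s => s))]
  rw [List.toFinset_eq_of_perm _ _ (PySem.List.sorted_perm (nums.map PySem.Int.toStr) (fun s => s) false)]
  rw [min_def]
  split <;> split <;> omega
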